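-- pv_equiv track=rewrite | github.com/MrBrantCode/unitest_baseline | mut_generate/mist_train_cf/cf_85224/solution.py | find_mismatches
-- ===== SOURCE A (Python) =====
-- def find_mismatches(s1, s2):
--     mismatches = []
--     # Normalize the length by padding shorter string with None
--     maxlen = max(len(s1), len(s2))
--     s1 += '\0' * (maxlen - len(s1))
--     s2 += '\0' * (maxlen - len(s2))
--
--     # Find mismatches
--     for idx, (c1, c2) in enumerate(zip(s1, s2)):
--         if c1 != c2:
--             mismatches.append(idx)
--     return mismatches
-- ===== SOURCE B (Python) =====
-- def find_mismatches(s1, s2):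
--     n = min(len(s1), len(s2))
--     res = [i for i in range(n) if s1[i] != s2[i]]
--     longer = s1 if len(s2) <= len(s1) else s2
--     res += [i for i in range(n, len(longer)) if longer[i] != '\0']
--     return res
-- ===== Notes on version B (the rewrite author's own statement) =====
-- stated objective: alternative
-- what changed: B avoids allocating padded copies of the strings: one pass compares the common prefix directly and a second pass scans only the tail of the longer string against '\0', instead of A's padding both strings and zipping them.
import Mathlib
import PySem

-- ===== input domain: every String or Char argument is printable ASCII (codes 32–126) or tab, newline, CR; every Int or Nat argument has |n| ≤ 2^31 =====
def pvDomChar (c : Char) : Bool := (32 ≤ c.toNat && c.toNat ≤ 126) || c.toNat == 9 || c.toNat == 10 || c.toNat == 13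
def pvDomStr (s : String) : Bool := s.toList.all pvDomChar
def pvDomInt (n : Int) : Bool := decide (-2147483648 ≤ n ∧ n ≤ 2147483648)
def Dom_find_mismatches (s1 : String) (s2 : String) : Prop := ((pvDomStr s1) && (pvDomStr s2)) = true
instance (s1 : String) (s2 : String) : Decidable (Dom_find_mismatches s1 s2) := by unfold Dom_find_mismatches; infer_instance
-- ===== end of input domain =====

-- B scans the common prefix and then the longer string's tail against '\0' instead of
-- padding both strings and zipping them (alternative decomposition, same cost).

-- ===== PORT A =====
def find_mismatches (s1 : String) (s2 : String) : List Int :=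
  let l1 := s1.toList
  let l2 := s2.toList
  let maxlen := max l1.length l2.length
  let p1 := l1 ++ List.replicate (maxlen - l1.length) (Char.ofNat 0)
  let p2 := l2 ++ List.replicate (maxlen - l2.length) (Char.ofNat 0)
  (PySem.List.enumerate (p1.zip p2)).foldl
    (fun acc q => if q.2.1 != q.2.2 then acc ++ [q.1] else acc) []

-- ===== PORT B =====
def find_mismatches_alt (s1 : String) (s2 : String) : List Int :=
  let l1 := s1.toList
  let l2 := s2.toList
  let n : Int := min (PySem.List.len l1) (PySem.List.len l2)
  let head := (PySem.List.pyRange 0 n 1).filter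
    (fun i => PySem.List.pyGetD l1 i (Char.ofNat 0) != PySem.List.pyGetD l2 i (Char.ofNat 0))
  let longer := if PySem.List.len l2 ≤ PySem.List.len l1 then l1 else l2
  let tail := (PySem.List.pyRange n (PySem.List.len longer) 1).filter
    (fun i => PySem.List.pyGetD longer i (Char.ofNat 0) != Char.ofNat 0)
  head ++ tail

-- ===== PRECONDITION & SPEC =====
def Spec_find_mismatches (s1 : String) (s2 : String) (out : List Int) : Prop := out = find_mismatches_alt s1 s2
instance (s1 : String) (s2 : String) (out : List Int) : Decidable (Spec_find_mismatches s1 s2 out) := by unfold Spec_find_mismatches; infer_instance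

-- ===== CLAIM (what is proved, stated in full; the proofs are below) =====
def Claim_equal_find_mismatches : Prop := ∀ (s1 : String) (s2 : String), Dom_find_mismatches s1 s2 → Spec_find_mismatches s1 s2 (find_mismatches s1 s2)

-- ===== LEMMAS AND PROOFS =====

-- `!=` on Char is symmetric.
theorem char_bne_comm (a b : Char) : (a != b) = (b != a) := by
  by_cases h : a = b
  · simp [h]
  · simp [bne, h, Ne.symm h]

-- A's enumerate/zip fold is a filter of range(maxlen) over the padded lists.
theorem find_mismatches_eq_filter (x y : List Char) :
    (PySem.List.enumerate (x.zip y)).foldl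
      (fun acc q => if q.2.1 != q.2.2 then acc ++ [q.1] else acc) []
    = (PySem.List.pyRange 0 (PySem.List.len (x.zip y)) 1).filter
        (fun i => (PySem.List.pyGetD (x.zip y) i ((Char.ofNat 0), (Char.ofNat 0))).1
                  != (PySem.List.pyGetD (x.zip y) i ((Char.ofNat 0), (Char.ofNat 0))).2) := by
  rw [PySem.List.foldl_append_if (p := fun q : Int × Char × Char => q.2.1 != q.2.2) (f := (·.1))]
  rw [PySem.List.enumerate_eq_map_pyRange (x.zip y) ((Char.ofNat 0), (Char.ofNat 0))]
  rw [List.filter_map, List.map_map]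
  simp [Function.comp_def]

-- The list-level equivalence of the two decompositions.
theorem list_level (l1 l2 : List Char) :
    (PySem.List.enumerate
        ((l1 ++ List.replicate (max l1.length l2.length - l1.length) (Char.ofNat 0)).zip
         (l2 ++ List.replicate (max l1.length l2.length - l2.length) (Char.ofNat 0)))).foldl
      (fun acc q => if q.2.1 != q.2.2 then acc ++ [q.1] else acc) []
    = (PySem.List.pyRange 0 (min (PySem.List.len l1) (PySem.List.len l2)) 1).filter
        (fun i => PySem.List.pyGetD l1 i (Char.ofNat 0) != PySem.List.pyGetD l2 i (Char.ofNat 0))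
      ++ (PySem.List.pyRange (min (PySem.List.len l1) (PySem.List.len l2))
            (PySem.List.len (if PySem.List.len l2 ≤ PySem.List.len l1 then l1 else l2)) 1).filter
          (fun i => PySem.List.pyGetD (if PySem.List.len l2 ≤ PySem.List.len l1 then l1 else l2) i
              (Char.ofNat 0) != Char.ofNat 0) := by
  set c0 := Char.ofNat 0 with hc0
  set p1 := l1 ++ List.replicate (max l1.length l2.length - l1.length) c0 with hp1
  set p2 := l2 ++ List.replicate (max l1.length l2.length - l2.length) c0 with hp2
  have hlen1 : p1.length = max l1.length l2.length := by simp [hp1]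
  have hlen2 : p2.length = max l1.length l2.length := by simp [hp2]
  have hzlen : PySem.List.len (p1.zip p2) = ((max l1.length l2.length : Nat) : Int) := by
    simp [PySem.List.len_eq, List.length_zip, hlen1, hlen2]
  rw [find_mismatches_eq_filter p1 p2, hzlen]
  have hmin : min (PySem.List.len l1) (PySem.List.len l2) = ((min l1.length l2.length : Nat) : Int) := by
    simp [PySem.List.len_eq]
  rw [hmin]
  rw [PySem.List.pyRange_one_append 0 ((min l1.length l2.length : Nat) : Int)
        ((max l1.length l2.length : Nat) : Int) (by positivity) (by exact_mod_cast min_le_max)]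
  rw [List.filter_append]
  have hget : ∀ (k : Nat), k < max l1.length l2.length →
      PySem.List.pyGetD (p1.zip p2) ((k : Nat) : Int) (c0, c0) = (p1.getD k c0, p2.getD k c0) := by
    intro k hk
    have hk1 : k < p1.length := by omega
    have hk2 : k < p2.length := by omega
    have hkz : ((k : Nat) : Int) < ((p1.zip p2).length : Int) := by
      simp [List.length_zip, hlen1, hlen2]; omega
    rw [PySem.List.pyGetD_eq_getElem _ _ (by positivity) hkz]
    simp only [Int.toNat_natCast]
    rw [List.getElem_zip]
    simp [hk1, hk2]
  have hrep : ∀ (m j : Nat), (List.replicate m c0).getD j c0 = c0 := by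
    intro m j
    simp [List.getD_eq_getElem?_getD, List.getElem?_replicate]
    split <;> rfl
  congr 1
  · apply List.filter_congr
    intro i hi
    rw [PySem.List.mem_pyRange_one] at hi
    obtain ⟨h0, h1⟩ := hi
    obtain ⟨k, rfl⟩ : ∃ k : Nat, i = (k : Int) := ⟨i.toNat, by omega⟩
    have hk1 : k < l1.length := by omega
    have hk2 : k < l2.length := by omega
    rw [hget k (by omega)]
    simp only [hp1, hp2, PySem.List.pyGetD_natCast]
    rw [List.getD_append _ _ _ _ hk1, List.getD_append _ _ _ _ hk2]
  · by_cases hc : l2.length ≤ l1.length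
    · have hif : (if PySem.List.len l2 ≤ PySem.List.len l1 then l1 else l2) = l1 := by
        simp [PySem.List.len_eq]; omega
      rw [hif]
      have hmx : (max l1.length l2.length) = l1.length := by omega
      have hln : PySem.List.len l1 = ((l1.length : Nat) : Int) := by simp [PySem.List.len_eq]
      rw [hln, hmx]
      apply List.filter_congr
      intro i hi
      rw [PySem.List.mem_pyRange_one] at hi
      obtain ⟨h0, h1⟩ := hi
      obtain ⟨k, rfl⟩ : ∃ k : Nat, i = (k : Int) := ⟨i.toNat, by omega⟩
      have hk1 : k < l1.length := by omega
      have hk2 : l2.length ≤ k := by omega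
      rw [hget k (by omega)]
      simp only [hp1, hp2, PySem.List.pyGetD_natCast]
      rw [List.getD_append _ _ _ _ hk1, List.getD_append_right _ _ _ _ hk2, hrep]
    · have hif : (if PySem.List.len l2 ≤ PySem.List.len l1 then l1 else l2) = l2 := by
        simp [PySem.List.len_eq]; omega
      rw [hif]
      have hmx : (max l1.length l2.length) = l2.length := by omega
      have hln : PySem.List.len l2 = ((l2.length : Nat) : Int) := by simp [PySem.List.len_eq]
      rw [hln, hmx]
      apply List.filter_congr
      intro i hi
      rw [PySem.List.mem_pyRange_one] at hi
      obtain ⟨h0, h1⟩ := hi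
      obtain ⟨k, rfl⟩ : ∃ k : Nat, i = (k : Int) := ⟨i.toNat, by omega⟩
      have hk2 : k < l2.length := by omega
      have hk1 : l1.length ≤ k := by omega
      rw [hget k (by omega)]
      simp only [hp1, hp2, PySem.List.pyGetD_natCast]
      rw [List.getD_append _ _ _ _ hk2, List.getD_append_right _ _ _ _ hk1, hrep]
      simp [char_bne_comm]

-- ===== VERDICT (by name: the statement is the Claim_ definition above) =====
theorem find_mismatches_spec : Claim_equal_find_mismatches := by
  intro s1 s2 _
  unfold Spec_find_mismatches find_mismatches find_mismatches_alt
  exact list_level s1.toList s2.toList
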